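-- pv_equiv track=rewrite | github.com/raulsteinmetz/iso-layer1-wave-encoder | wave_generator.py | diferential_man_encode
-- ===== SOURCE A (Python) =====
-- def diferential_man_encode(data):
--     encoded_data = []
--     last_bit = 1
--     for bit in data:
--         if (bit == 1):
--             if (last_bit == 1):
--                 encoded_data += [1, 0]
--                 last_bit = 0
--             else:
--                 encoded_data += [0, 1]
--                 last_bit = 1
--         else:
--             if (last_bit == 1):
--                 encoded_data += [0, 1]
--             else:
--                 encoded_data += [1, 0]
--     return encoded_data
-- ===== SOURCE B (Python) =====
-- def diferential_man_encode(data):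
--     # Stage 1: number of 1-bits strictly before each position.
--     ones_before = []
--     c = 0
--     for b in data:
--         ones_before.append(c)
--         if b == 1:
--             c += 1
--     # Stage 2: each half-bit sample follows in closed form from that count:
--     # first sample f = (ones_before + (bit != 1) + 1) % 2, second sample = 1 - f.
--     out = []
--     for p, b in zip(ones_before, data):
--         f = (p + (b != 1) + 1) % 2
--         out += [f, 1 - f]
--     return out
-- ===== Notes on version B (the rewrite author's own statement) =====
-- stated objective: alternative
-- what changed: Replaces A's single-pass stateful (bit, last_bit) four-case state machine by two staged passes: a prefix pass recording the count of 1-bits before each position, then a stateless emission computing each half-bit pair in closed form as f = (ones_before + (bit != 1) + 1) % 2, [f, 1-f].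
import Mathlib
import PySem

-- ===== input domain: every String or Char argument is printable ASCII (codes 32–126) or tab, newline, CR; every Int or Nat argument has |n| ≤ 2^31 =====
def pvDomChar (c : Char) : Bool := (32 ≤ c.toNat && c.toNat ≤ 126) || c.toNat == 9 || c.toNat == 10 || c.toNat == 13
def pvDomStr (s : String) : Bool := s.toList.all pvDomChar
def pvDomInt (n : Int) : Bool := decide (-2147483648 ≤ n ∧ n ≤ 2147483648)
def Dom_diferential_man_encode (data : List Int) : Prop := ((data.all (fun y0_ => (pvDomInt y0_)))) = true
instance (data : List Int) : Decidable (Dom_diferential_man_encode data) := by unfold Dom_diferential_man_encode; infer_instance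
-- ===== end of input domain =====

-- B replaces A's stateful four-case (bit, last_bit) machine by two stages: a prefix pass
-- counting 1-bits before each position, then a stateless closed-form emission of each
-- half-bit pair from that count; objective: alternative decomposition.

-- ===== PORT A =====
-- loop over data with state (encoded_data, last_bit)
def pvGoA : List Int → List Int → Int → List Int
  | acc, [], _ => acc
  | acc, bit :: rest, last_bit =>
    if bit == 1 then
      if last_bit == 1 then pvGoA (acc ++ [1, 0]) rest 0
      else pvGoA (acc ++ [0, 1]) rest 1
    else
      if last_bit == 1 then pvGoA (acc ++ [0, 1]) rest last_bit
      else pvGoA (acc ++ [1, 0]) rest last_bit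

def diferential_man_encode (data : List Int) : List Int := pvGoA [] data 1

-- ===== PORT B =====
-- stage 1: count of 1-bits strictly before each position
def pvOnesBefore : List Int → Int → List Int
  | [], _ => []
  | b :: rest, c => c :: pvOnesBefore rest (if b == 1 then c + 1 else c)

-- stage 2: stateless emission, f = (p + (b != 1) + 1) % 2, pair [f, 1 - f]
def pvEmitB : List Int → List (Int × Int) → List Int
  | out, [] => out
  | out, (p, b) :: rest =>
    let f : Int := PySem.Int.mod (p + (if b != 1 then 1 else 0) + 1) 2
    pvEmitB (out ++ [f, 1 - f]) rest

def diferential_man_encode_alt (data : List Int) : List Int :=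
  pvEmitB [] ((pvOnesBefore data 0).zip data)

-- ===== PRECONDITION & SPEC =====
def Spec_diferential_man_encode (data : List Int) (out : List Int) : Prop := out = diferential_man_encode_alt data
instance (data : List Int) (out : List Int) : Decidable (Spec_diferential_man_encode data out) := by unfold Spec_diferential_man_encode; infer_instance

-- ===== CLAIM (what is proved, stated in full; the proofs are below) =====
def Claim_equal_diferential_man_encode : Prop := ∀ (data : List Int), Dom_diferential_man_encode data → Spec_diferential_man_encode data (diferential_man_encode data)

-- ===== LEMMAS AND PROOFS =====
-- A's running last_bit equals 1 - (ones-so-far % 2); with that invariant the two loops align.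
theorem pvGo_eq (rest : List Int) : ∀ (acc : List Int) (c : Int), 0 ≤ c →
    pvGoA acc rest (1 - c % 2) = pvEmitB acc ((pvOnesBefore rest c).zip rest) := by
  induction rest with
  | nil => intro acc c _; rfl
  | cons b rest ih =>
    intro acc c hc
    rcases Int.emod_two_eq c with h | h <;> by_cases hb : b = 1
    · have h1 : (c + 1) % 2 = 1 := by omega
      have hf : ((c + 1).fmod 2 : Int) = 1 := by simp [Int.fmod_eq_emod]; omega
      simpa [pvGoA, pvOnesBefore, pvEmitB, PySem.Int.mod, hb, h, hf] using
        (by simpa [h1] using ih (acc ++ [1, 0]) (c + 1) (by omega))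
    · have hf : ((c + 1 + 1).fmod 2 : Int) = 0 := by simp [Int.fmod_eq_emod]; omega
      simpa [pvGoA, pvOnesBefore, pvEmitB, PySem.Int.mod, hb, h, hf] using
        (by simpa [h] using ih (acc ++ [0, 1]) c hc)
    · have h1 : (c + 1) % 2 = 0 := by omega
      have hf : ((c + 1).fmod 2 : Int) = 0 := by simp [Int.fmod_eq_emod]; omega
      simpa [pvGoA, pvOnesBefore, pvEmitB, PySem.Int.mod, hb, h, hf] using
        (by simpa [h1] using ih (acc ++ [0, 1]) (c + 1) (by omega))
    · have hf : ((c + 1 + 1).fmod 2 : Int) = 1 := by simp [Int.fmod_eq_emod]; omega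
      simpa [pvGoA, pvOnesBefore, pvEmitB, PySem.Int.mod, hb, h, hf] using
        (by simpa [h] using ih (acc ++ [1, 0]) c hc)

-- ===== VERDICT (by name: the statement is the Claim_ definition above) =====
theorem diferential_man_encode_spec : Claim_equal_diferential_man_encode := by
  intro data _
  unfold Spec_diferential_man_encode diferential_man_encode diferential_man_encode_alt
  simpa using pvGo_eq data [] 0 le_rfl
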